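-- pv_equiv track=rewrite | github.com/deeatrvu/AI-Coach | backend/app/services/evaluation.py | generate_scores_simple
-- ===== SOURCE A (Python) =====
-- from typing import List, Dict, Any, Optional
--
-- def get_rep_turns(conversation: List[Dict[str, Any]]) -> List[Dict[str, Any]]:
--     """Filter conversation to only MR messages."""
--     return [msg for msg in conversation if msg.get("role") == "rep"]
--
-- def generate_scores_simple(transcript: List[Dict[str, Any]], persona: Dict[str, Any]) -> Dict[str, int]:
--     """Generate simple scores without external LLM call."""
--     rep_turns = get_rep_turns(transcript)
--
--     # Simple scoring based on content analysis
--     accuracy = 70  # Base score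
--     empathy = 60   # Base score
--     compliance = 80  # Will be adjusted by compliance check
--     adaptability = 65  # Base score
--
--     # Adjust based on content
--     full_text = " ".join([msg.get("content", "").lower() for msg in rep_turns])
--
--     if "evidence" in full_text or "trial" in full_text:
--         accuracy += 15
--     if "patient" in full_text or "safety" in full_text:
--         empathy += 20
--     if "best" in full_text or "revolutionary" in full_text:
--         accuracy -= 10
--         compliance -= 15
--
--     return {
--         "accuracy": max(0, min(100, accuracy)),
--         "empathy": max(0, min(100, empathy)),
--         "compliance": max(0, min(100, compliance)),
--         "adaptability": max(0, min(100, adaptability)),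
--     }
-- ===== SOURCE B (Python) =====
-- def generate_scores_simple(transcript, persona):
--     """Generate simple scores without external LLM call."""
--     has_evidence = False
--     has_patient = False
--     has_hype = False
--     for msg in transcript:
--         if msg.get("role") != "rep":
--             continue
--         text = msg.get("content", "").lower()
--         has_evidence = has_evidence or "evidence" in text or "trial" in text
--         has_patient = has_patient or "patient" in text or "safety" in text
--         has_hype = has_hype or "best" in text or "revolutionary" in text
--     accuracy = 70 + (15 if has_evidence else 0) - (10 if has_hype else 0)
--     empathy = 60 + (20 if has_patient else 0)
--     compliance = 80 - (15 if has_hype else 0)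
--     return {
--         "accuracy": max(0, min(100, accuracy)),
--         "empathy": max(0, min(100, empathy)),
--         "compliance": max(0, min(100, compliance)),
--         "adaptability": 65,
--     }
-- ===== Notes on version B (the rewrite author's own statement) =====
-- stated objective: simpler
-- what changed: Single pass over the transcript with three OR-accumulated boolean flags per keyword group instead of filtering rep turns, building a joined full_text string and substring-searching it; no keyword spans the space separator, so per-message membership is equivalent.
import Mathlib
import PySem

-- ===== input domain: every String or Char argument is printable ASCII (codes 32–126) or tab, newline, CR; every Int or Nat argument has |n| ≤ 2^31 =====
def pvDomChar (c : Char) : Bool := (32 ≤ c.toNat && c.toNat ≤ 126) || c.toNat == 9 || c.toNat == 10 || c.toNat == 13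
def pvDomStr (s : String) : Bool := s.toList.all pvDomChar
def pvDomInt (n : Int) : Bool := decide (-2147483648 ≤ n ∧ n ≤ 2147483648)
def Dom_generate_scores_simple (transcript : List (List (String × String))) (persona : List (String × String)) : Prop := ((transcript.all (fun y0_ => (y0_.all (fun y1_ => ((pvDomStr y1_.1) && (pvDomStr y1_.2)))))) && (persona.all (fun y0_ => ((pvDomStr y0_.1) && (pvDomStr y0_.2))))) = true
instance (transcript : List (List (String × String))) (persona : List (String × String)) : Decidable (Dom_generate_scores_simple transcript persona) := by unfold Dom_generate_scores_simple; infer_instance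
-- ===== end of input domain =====

-- B replaces A's joined full_text string and its substring searches by one pass over the
-- transcript OR-accumulating three per-keyword-group boolean flags (objective: simpler).

-- ===== PORT A =====
def get_rep_turns (conversation : List (List (String × String))) : List (List (String × String)) :=
  conversation.filter (fun msg => (PySem.Dict.mk msg).get? "role" == some "rep")

def generate_scores_simple (transcript : List (List (String × String))) (persona : List (String × String)) : List (String × Int) :=
  let rep_turns := get_rep_turns transcript
  let accuracy : Int := 70
  let empathy : Int := 60
  let compliance : Int := 80
  let adaptability : Int := 65
  let full_text := PySem.Str.join " " (rep_turns.map (fun msg => PySem.Str.lower ((PySem.Dict.mk msg).getD "content" "")))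
  let accuracy := if PySem.Str.isIn "evidence" full_text || PySem.Str.isIn "trial" full_text then accuracy + 15 else accuracy
  let empathy := if PySem.Str.isIn "patient" full_text || PySem.Str.isIn "safety" full_text then empathy + 20 else empathy
  let accuracy := if PySem.Str.isIn "best" full_text || PySem.Str.isIn "revolutionary" full_text then accuracy - 10 else accuracy
  let compliance := if PySem.Str.isIn "best" full_text || PySem.Str.isIn "revolutionary" full_text then compliance - 15 else compliance
  [("accuracy", max 0 (min 100 accuracy)),
   ("empathy", max 0 (min 100 empathy)),
   ("compliance", max 0 (min 100 compliance)),
   ("adaptability", max 0 (min 100 adaptability))]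

-- ===== PORT B =====
def pvStepB (st : Bool × Bool × Bool) (msg : List (String × String)) : Bool × Bool × Bool :=
  if (PySem.Dict.mk msg).get? "role" ≠ some "rep" then st
  else
    let text := PySem.Str.lower ((PySem.Dict.mk msg).getD "content" "")
    (st.1 || PySem.Str.isIn "evidence" text || PySem.Str.isIn "trial" text,
     st.2.1 || PySem.Str.isIn "patient" text || PySem.Str.isIn "safety" text,
     st.2.2 || PySem.Str.isIn "best" text || PySem.Str.isIn "revolutionary" text)

def generate_scores_simple_alt (transcript : List (List (String × String))) (persona : List (String × String)) : List (String × Int) :=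
  let st := transcript.foldl pvStepB (false, false, false)
  let accuracy : Int := 70 + (if st.1 then 15 else 0) - (if st.2.2 then 10 else 0)
  let empathy : Int := 60 + (if st.2.1 then 20 else 0)
  let compliance : Int := 80 - (if st.2.2 then 15 else 0)
  [("accuracy", max 0 (min 100 accuracy)),
   ("empathy", max 0 (min 100 empathy)),
   ("compliance", max 0 (min 100 compliance)),
   ("adaptability", 65)]

-- ===== PRECONDITION & SPEC =====
def Spec_generate_scores_simple (transcript : List (List (String × String))) (persona : List (String × String)) (out : List (String × Int)) : Prop := out = generate_scores_simple_alt transcript persona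
instance (transcript : List (List (String × String))) (persona : List (String × String)) (out : List (String × Int)) : Decidable (Spec_generate_scores_simple transcript persona out) := by unfold Spec_generate_scores_simple; infer_instance

-- ===== CLAIM (what is proved, stated in full; the proofs are below) =====
def Claim_equal_generate_scores_simple : Prop := ∀ (transcript : List (List (String × String))) (persona : List (String × String)), Dom_generate_scores_simple transcript persona → Spec_generate_scores_simple transcript persona (generate_scores_simple transcript persona)

-- ===== LEMMAS AND PROOFS =====

-- a prefix of a ++ c :: b that avoids c is a prefix of a
theorem pv_prefix_avoid {kw a b : List Char} {c : Char} (hc : c ∉ kw) (h : kw <+: a ++ c :: b) : kw <+: a := by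
  induction kw generalizing a with
  | nil => exact List.nil_prefix
  | cons k kw' ih =>
    cases a with
    | nil =>
      rcases h with ⟨t, ht⟩
      simp at ht
      exact absurd (ht.1 ▸ List.mem_cons_self) hc
    | cons x a' =>
      rcases h with ⟨t, ht⟩
      simp at ht
      obtain ⟨rfl, ht'⟩ := ht
      have hp : kw' <+: a' := ih (fun hm => hc (List.mem_cons_of_mem _ hm)) ⟨t, ht'⟩
      rcases hp with ⟨t', rfl⟩
      exact ⟨t', rfl⟩

-- an infix of a ++ c :: b that avoids c lies inside a or inside b
theorem pv_infix_split {kw : List Char} {c : Char} (hc : c ∉ kw) (hne : kw ≠ []) (a b : List Char) :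
    kw <:+: a ++ c :: b ↔ kw <:+: a ∨ kw <:+: b := by
  constructor
  · intro h
    induction a with
    | nil =>
      simp only [List.nil_append] at h
      rcases List.infix_cons_iff.mp h with hp | hi
      · exact absurd (pv_prefix_avoid (a := []) hc hp) (fun h0 => hne (List.prefix_nil.mp h0))
      · exact Or.inr hi
    | cons x a' ih =>
      rcases List.infix_cons_iff.mp h with hp | hi
      · exact Or.inl (pv_prefix_avoid (a := x :: a') hc hp).isInfix
      · rcases ih hi with h1 | h2
        · exact Or.inl (h1.trans (List.suffix_cons x a').isInfix)
        · exact Or.inr h2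
  · rintro (h | h)
    · exact h.trans (List.prefix_append a (c :: b)).isInfix
    · exact h.trans ((List.suffix_cons c b).trans (List.suffix_append a (c :: b))).isInfix

-- substring-in-join with the single-space separator ↔ some part contains it (kw spaceless, nonempty)
theorem pv_isIn_join {kw : List Char} (hc : ' ' ∉ kw) (hne : kw ≠ []) (parts : List (List Char)) :
    PySem.Chars.isIn kw (PySem.Chars.join [' '] parts) = parts.any (fun p => PySem.Chars.isIn kw p) := by
  induction parts with
  | nil =>
    simp only [PySem.Chars.join_nil, List.any_nil]
    rw [PySem.Chars.isIn_eq_false_iff]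
    intro h
    exact hne (List.infix_nil.mp h)
  | cons p rest ih =>
    cases rest with
    | nil => simp [PySem.Chars.join_singleton]
    | cons q rest' =>
      rw [PySem.Chars.join_cons_cons, List.append_assoc, List.singleton_append, Bool.eq_iff_iff,
        PySem.Chars.isIn_iff_infix, pv_infix_split hc hne, List.any_cons, ← ih,
        Bool.or_eq_true, PySem.Chars.isIn_iff_infix, PySem.Chars.isIn_iff_infix]

theorem pv_any_or {α : Type} (l : List α) (f g : α → Bool) : (l.any fun x => f x || g x) = (l.any f || l.any g) := by
  rw [Bool.eq_iff_iff]
  simp only [List.any_eq_true, Bool.or_eq_true]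
  constructor
  · rintro ⟨x, hx, h | h⟩
    · exact Or.inl ⟨x, hx, h⟩
    · exact Or.inr ⟨x, hx, h⟩
  · rintro (⟨x, hx, h⟩ | ⟨x, hx, h⟩)
    · exact ⟨x, hx, Or.inl h⟩
    · exact ⟨x, hx, Or.inr h⟩

-- Str-level version of pv_isIn_join
theorem pv_str_isIn_join (kw : String) (hc : ' ' ∉ kw.toList) (hne : kw.toList ≠ []) (parts : List String) :
    PySem.Str.isIn kw (PySem.Str.join " " parts) = parts.any (fun p => PySem.Str.isIn kw p) := by
  rw [PySem.Str.isIn_eq, PySem.Str.toList_join]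
  have hsep : (" " : String).toList = [' '] := rfl
  rw [hsep, pv_isIn_join hc hne, List.any_map]
  rfl

-- B's fold computes the three OR-flags over the rep turns
theorem pv_foldl_flags (l : List (List (String × String))) (a b c : Bool) :
    l.foldl pvStepB (a, b, c) =
      (a || (get_rep_turns l).any (fun m => PySem.Str.isIn "evidence" (PySem.Str.lower ((PySem.Dict.mk m).getD "content" "")) || PySem.Str.isIn "trial" (PySem.Str.lower ((PySem.Dict.mk m).getD "content" ""))),
       b || (get_rep_turns l).any (fun m => PySem.Str.isIn "patient" (PySem.Str.lower ((PySem.Dict.mk m).getD "content" "")) || PySem.Str.isIn "safety" (PySem.Str.lower ((PySem.Dict.mk m).getD "content" ""))),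
       c || (get_rep_turns l).any (fun m => PySem.Str.isIn "best" (PySem.Str.lower ((PySem.Dict.mk m).getD "content" "")) || PySem.Str.isIn "revolutionary" (PySem.Str.lower ((PySem.Dict.mk m).getD "content" "")))) := by
  induction l generalizing a b c with
  | nil => simp [get_rep_turns]
  | cons m t ih =>
    by_cases h : (PySem.Dict.mk m).get? "role" = some "rep"
    · simp [List.foldl_cons, pvStepB, h, get_rep_turns, ih, Bool.or_assoc]
    · simp [List.foldl_cons, pvStepB, h, get_rep_turns, ih]

-- ===== VERDICT (by name: the statement is the Claim_ definition above) =====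
theorem generate_scores_simple_spec : Claim_equal_generate_scores_simple := by
  intro transcript persona _
  unfold Spec_generate_scores_simple generate_scores_simple generate_scores_simple_alt
  rw [pv_foldl_flags]
  simp only [Bool.false_or]
  rw [pv_str_isIn_join "evidence" (by decide) (by decide),
      pv_str_isIn_join "trial" (by decide) (by decide),
      pv_str_isIn_join "patient" (by decide) (by decide),
      pv_str_isIn_join "safety" (by decide) (by decide),
      pv_str_isIn_join "best" (by decide) (by decide),
      pv_str_isIn_join "revolutionary" (by decide) (by decide)]
  simp only [List.any_map, Function.comp_def]
  rw [← pv_any_or, ← pv_any_or, ← pv_any_or]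
  split_ifs <;> decide
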